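-- pv_equiv track=rewrite | github.com/nconforti93/exa-postgres-interface | src/exa_postgres_interface/policy.py | strip_sql_comments
-- ===== SOURCE A (Python) =====
-- def strip_sql_comments(sql: str) -> str:
--     out: list[str] = []
--     i = 0
--     in_string = False
--     while i < len(sql):
--         ch = sql[i]
--         nxt = sql[i + 1] if i + 1 < len(sql) else ""
--         if ch == "'":
--             out.append(ch)
--             if in_string and nxt == "'":
--                 out.append(nxt)
--                 i += 2
--                 continue
--             in_string = not in_string
--             i += 1
--             continue
--         if not in_string and ch == "-" and nxt == "-":
--             i = sql.find("\n", i)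
--             if i == -1:
--                 break
--             continue
--         if not in_string and ch == "/" and nxt == "*":
--             end = sql.find("*/", i + 2)
--             i = len(sql) if end == -1 else end + 2
--             continue
--         out.append(ch)
--         i += 1
--     return "".join(out)
-- ===== SOURCE B (Python) =====
-- def strip_sql_comments(sql: str) -> str:
--     NORMAL, STRING, LINE, BLOCK = 0, 1, 2, 3
--     mode = NORMAL
--     out = []
--     i, n = 0, len(sql)
--     while i < n:
--         c = sql[i]
--         if mode == NORMAL:
--             if c == "'":
--                 out.append(c); mode = STRING; i += 1
--             elif c == "-" and i + 1 < n and sql[i + 1] == "-":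
--                 mode = LINE; i += 2
--             elif c == "/" and i + 1 < n and sql[i + 1] == "*":
--                 mode = BLOCK; i += 2
--             else:
--                 out.append(c); i += 1
--         elif mode == STRING:
--             if c == "'":
--                 if i + 1 < n and sql[i + 1] == "'":
--                     out.append("''"); i += 2
--                 else:
--                     out.append(c); mode = NORMAL; i += 1
--             else:
--                 out.append(c); i += 1
--         elif mode == LINE:
--             if c == "\n":
--                 out.append(c); mode = NORMAL
--             i += 1
--         else:  # BLOCK
--             if c == "*" and i + 1 < n and sql[i + 1] == "/":
--                 mode = NORMAL; i += 2
--             else: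
--                 i += 1
--     return "".join(out)
-- ===== Notes on version B (the rewrite author's own statement) =====
-- stated objective: alternative
-- what changed: Replaced A's in_string flag plus find()-jumps over comment bodies by a uniform four-mode (normal/string/line-comment/block-comment) character-by-character state machine that advances one (or two) positions per step with no searching.
import Mathlib
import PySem

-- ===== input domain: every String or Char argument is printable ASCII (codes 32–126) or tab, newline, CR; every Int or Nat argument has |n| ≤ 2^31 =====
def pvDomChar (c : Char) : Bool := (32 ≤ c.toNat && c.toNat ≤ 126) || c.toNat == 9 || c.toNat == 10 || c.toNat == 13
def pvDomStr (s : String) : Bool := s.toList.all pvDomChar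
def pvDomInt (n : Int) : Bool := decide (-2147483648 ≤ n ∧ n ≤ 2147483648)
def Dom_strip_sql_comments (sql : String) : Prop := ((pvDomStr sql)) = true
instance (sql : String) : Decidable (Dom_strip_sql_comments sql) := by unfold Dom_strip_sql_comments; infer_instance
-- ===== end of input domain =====

-- B replaces A's in_string flag + find()-jumps by a uniform four-mode character state machine (alternative decomposition, same O(n) cost).

-- ===== PORT A =====
-- A's while loop, transliterated with a fuel counter (len + 1 steps always suffice: i strictly increases each iteration)
def stripA_loop : List Char → Nat → Nat → Bool → List Char → List Char
  | _, 0, _, _, out => out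
  | l, fuel + 1, i, instr, out =>
    if h : i < l.length then
      let ch := l[i]
      let nxt := l[i + 1]?
      if ch = '\'' then
        if instr = true ∧ nxt = some '\'' then
          stripA_loop l fuel (i + 2) instr (out ++ [ch] ++ ['\''])
        else
          stripA_loop l fuel (i + 1) (!instr) (out ++ [ch])
      else if instr = false ∧ ch = '-' ∧ nxt = some '-' then
        let j := PySem.Chars.findFrom l ['\n'] (i : Int)
        if j = -1 then out
        else stripA_loop l fuel j.toNat instr out
      else if instr = false ∧ ch = '/' ∧ nxt = some '*' then
        let e := PySem.Chars.findFrom l ['*', '/'] ((i : Int) + 2)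
        stripA_loop l fuel (if e = -1 then l.length else e.toNat + 2) instr out
      else
        stripA_loop l fuel (i + 1) instr (out ++ [ch])
    else out

def strip_sql_comments (sql : String) : String :=
  String.ofList (stripA_loop sql.toList (sql.toList.length + 1) 0 false [])

-- ===== PORT B =====
inductive PvMode : Type
  | norm | instr | line | block
deriving DecidableEq, Repr

def stripB_go : PvMode → List Char → List Char
  | _, [] => []
  | .norm, [c] =>
      if c = '\'' then ['\''] else [c]
  | .norm, c :: d :: rest =>
      if c = '\'' then '\'' :: stripB_go .instr (d :: rest)
      else if c = '-' ∧ d = '-' then stripB_go .line rest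
      else if c = '/' ∧ d = '*' then stripB_go .block rest
      else c :: stripB_go .norm (d :: rest)
  | .instr, [c] => [c]
  | .instr, c :: d :: rest =>
      if c = '\'' then
        if d = '\'' then '\'' :: '\'' :: stripB_go .instr rest
        else '\'' :: stripB_go .norm (d :: rest)
      else c :: stripB_go .instr (d :: rest)
  | .line, c :: rest =>
      if c = '\n' then '\n' :: stripB_go .norm rest
      else stripB_go .line rest
  | .block, [_] => []
  | .block, c :: d :: rest =>
      if c = '*' ∧ d = '/' then stripB_go .norm rest
      else stripB_go .block (d :: rest)

def strip_sql_comments_alt (sql : String) : String :=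
  String.ofList (stripB_go .norm sql.toList)

-- ===== PRECONDITION & SPEC =====
def Spec_strip_sql_comments (sql : String) (out : String) : Prop := out = strip_sql_comments_alt sql
instance (sql : String) (out : String) : Decidable (Spec_strip_sql_comments sql out) := by unfold Spec_strip_sql_comments; infer_instance

-- ===== CLAIM (what is proved, stated in full; the proofs are below) =====
def Claim_equal_strip_sql_comments : Prop := ∀ (sql : String), Dom_strip_sql_comments sql → Spec_strip_sql_comments sql (strip_sql_comments sql)

-- ===== LEMMAS AND PROOFS =====

theorem pv_go_nil (m : PvMode) : stripB_go m [] = [] := by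
  cases m <;> rfl

theorem pv_go_norm (c : Char) (rest : List Char) :
    stripB_go .norm (c :: rest) =
      if c = '\'' then '\'' :: stripB_go .instr rest
      else if c = '-' ∧ rest.head? = some '-' then stripB_go .line rest.tail
      else if c = '/' ∧ rest.head? = some '*' then stripB_go .block rest.tail
      else c :: stripB_go .norm rest := by
  rcases rest with _ | ⟨d, r⟩ <;> simp [stripB_go]

theorem pv_go_instr (c : Char) (rest : List Char) :
    stripB_go .instr (c :: rest) =
      if c = '\'' then
        if rest.head? = some '\'' then '\'' :: '\'' :: stripB_go .instr rest.tail
        else '\'' :: stripB_go .norm rest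
      else c :: stripB_go .instr rest := by
  rcases rest with _ | ⟨d, r⟩ <;> simp [stripB_go]

theorem pv_go_line (c : Char) (rest : List Char) :
    stripB_go .line (c :: rest) =
      if c = '\n' then '\n' :: stripB_go .norm rest else stripB_go .line rest := by
  rcases rest with _ | ⟨d, r⟩ <;> rfl

theorem pv_go_block (c : Char) (rest : List Char) :
    stripB_go .block (c :: rest) =
      if c = '*' ∧ rest.head? = some '/' then stripB_go .norm rest.tail
      else stripB_go .block rest := by
  rcases rest with _ | ⟨d, r⟩ <;> simp [stripB_go]

theorem pv_line_all (cs : List Char) (h : '\n' ∉ cs) : stripB_go .line cs = [] := by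
  induction cs with
  | nil => rfl
  | cons c rest ih =>
      rw [pv_go_line]
      have : ¬ c = '\n' := fun hc => h (hc ▸ List.mem_cons_self ..)
      simp [this]
      exact ih (fun hm => h (List.mem_cons_of_mem _ hm))

theorem pv_line_skip : ∀ (m : Nat) (cs : List Char), (∀ k < m, cs[k]? ≠ some '\n') → cs[m]? = some '\n' →
    stripB_go .line cs = '\n' :: stripB_go .norm (cs.drop (m + 1)) := by
  intro m
  induction m with
  | zero =>
      intro cs _ hm
      rcases cs with _ | ⟨c, rest⟩
      · simp at hm
      · simp at hm
        rw [pv_go_line]; simp [hm]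
  | succ m ih =>
      intro cs hlt hm
      rcases cs with _ | ⟨c, rest⟩
      · simp at hm
      · have hc : ¬ c = '\n' := by
          have := hlt 0 (Nat.succ_pos m); simpa using this
        rw [pv_go_line]; simp [hc]
        have := ih rest (fun k hk => by have := hlt (k + 1) (by omega); simpa using this) (by simpa using hm)
        simpa using this

theorem pv_block_all : ∀ (cs : List Char), (∀ k, ¬ ['*', '/'] <+: cs.drop k) → stripB_go .block cs = [] := by
  intro cs
  induction cs with
  | nil => intro _; rfl
  | cons c rest ih =>
      intro h
      rw [pv_go_block]
      have h0 : ¬ (c = '*' ∧ rest.head? = some '/') := by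
        rintro ⟨hc, hh⟩
        rcases rest with _ | ⟨d, t⟩
        · simp at hh
        · simp at hh
          exact h 0 (by simp [hc, hh])
      simp [h0]
      exact ih (fun k => by have := h (k + 1); simpa using this)

theorem pv_block_skip : ∀ (m : Nat) (cs : List Char), (∀ k < m, ¬ ['*', '/'] <+: cs.drop k) → ['*', '/'] <+: cs.drop m →
    stripB_go .block cs = stripB_go .norm (cs.drop (m + 2)) := by
  intro m
  induction m with
  | zero =>
      intro cs _ hm
      simp at hm
      rcases hm with ⟨t, ht⟩
      subst ht
      simp only [List.cons_append, List.nil_append]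
      rw [pv_go_block]; simp
  | succ m ih =>
      intro cs hlt hm
      rcases cs with _ | ⟨c, rest⟩
      · simp at hm
      · have h0 : ¬ (c = '*' ∧ rest.head? = some '/') := by
          rintro ⟨hc, hh⟩
          rcases rest with _ | ⟨d, t⟩
          · simp at hh
          · simp at hh
            exact hlt 0 (Nat.succ_pos m) (by simp [hc, hh])
        rw [pv_go_block]; simp [h0]
        exact ih rest (fun k hk => by have := hlt (k + 1) (by omega); simpa using this) (by simpa using hm)

def pvModeOf (b : Bool) : PvMode := if b then .instr else .norm

theorem pv_singleton_infix {a : Char} {cs : List Char} (h : a ∈ cs) : [a] <:+: cs := by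
  obtain ⟨s, t, rfl⟩ := List.append_of_mem h
  exact ⟨s, t, by simp⟩

theorem pv_prefix_drop_infix {p cs : List Char} {k : Nat} (h : p <+: cs.drop k) : p <:+: cs :=
  h.isInfix.trans (List.drop_suffix k cs).isInfix

-- helper fact used by the equivalence proof below (a singleton pattern is found at an index holding that char, at or after the start)
theorem pvFindSingleton {l : List Char} {i : Nat} {c : Char} (hi : i ≤ l.length)
    (hj : PySem.Chars.findFrom l [c] (i : Int) ≠ -1) :
    i ≤ (PySem.Chars.findFrom l [c] (i : Int)).toNat ∧
      l[(PySem.Chars.findFrom l [c] (i : Int)).toNat]? = some c ∧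
      ∀ m, i ≤ m → m < (PySem.Chars.findFrom l [c] (i : Int)).toNat → l[m]? ≠ some c := by
  obtain ⟨h1, h2, h3⟩ := PySem.Chars.findFrom_natCast_spec l [c] i hi hj
  have hnn : (0 : Int) ≤ PySem.Chars.findFrom l [c] (i : Int) := le_trans (by exact_mod_cast Nat.zero_le i) h1
  refine ⟨?_, ?_, ?_⟩
  · omega
  · rcases h2 with ⟨t, ht⟩
    have := List.head?_drop (l := l) (i := (PySem.Chars.findFrom l [c] (i : Int)).toNat)
    rw [← this, ← ht]; rfl
  · intro m hm1 hm2 hmc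
    apply h3 m hm1 (by omega)
    have hh : (l.drop m).head? = some c := by rw [List.head?_drop]; exact hmc
    rcases hd : l.drop m with _ | ⟨a, t⟩
    · rw [hd] at hh; simp at hh
    · rw [hd] at hh; simp at hh
      exact ⟨t, by simp [hh]⟩

theorem pvModeOf_true : pvModeOf true = .instr := rfl
theorem pvModeOf_false : pvModeOf false = .norm := rfl

theorem pv_main : ∀ (fuel : Nat) (l : List Char) (i : Nat) (b : Bool) (out : List Char),
    l.length ≤ fuel + i → i ≤ l.length →
    stripA_loop l fuel i b out = out ++ stripB_go (pvModeOf b) (l.drop i) := by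
  intro fuel
  induction fuel with
  | zero =>
      intro l i b out hn hi
      have hieq : i = l.length := by omega
      rw [stripA_loop]
      simp [hieq, List.drop_length, pv_go_nil]
  | succ n ih =>
      intro l i b out hn hi
      by_cases h : i < l.length
      · have hd : l.drop i = l[i] :: l.drop (i + 1) := List.drop_eq_getElem_cons h
        have hhd : (l.drop (i + 1)).head? = l[i + 1]? := List.head?_drop
        have htl : (l.drop (i + 1)).tail = l.drop (i + 2) := List.tail_drop
        rw [stripA_loop]
        simp only [dif_pos h]
        by_cases hq : l[i] = '\''
        · rw [if_pos hq]
          by_cases hesc : b = true ∧ l[i + 1]? = some '\''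
          · rw [if_pos hesc]
            have hi2 : i + 2 ≤ l.length := by
              by_contra hc
              rw [List.getElem?_eq_none (by omega)] at hesc
              simp at hesc
            rw [ih l (i + 2) b (out ++ [l[i]] ++ ['\'']) (by omega) hi2]
            obtain ⟨hb, hn'⟩ := hesc
            subst hb
            rw [hd, pvModeOf_true, pv_go_instr, if_pos hq, hhd, if_pos hn', htl, hq]
            simp
          · rw [if_neg hesc]
            rw [ih l (i + 1) (!b) (out ++ [l[i]]) (by omega) (by omega)]
            cases b with
            | true =>
                have hn' : ¬ l[i + 1]? = some '\'' := fun hc => hesc ⟨rfl, hc⟩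
                rw [hd, Bool.not_true, pvModeOf_true, pvModeOf_false, pv_go_instr, if_pos hq, hhd, if_neg hn', hq]
                simp
            | false =>
                rw [hd, Bool.not_false, pvModeOf_false, pvModeOf_true, pv_go_norm, if_pos hq, hq]
                simp
        · rw [if_neg hq]
          by_cases hline : b = false ∧ l[i] = '-' ∧ l[i + 1]? = some '-'
          · rw [if_pos hline]
            obtain ⟨hb, hdash, hdash2⟩ := hline
            subst hb
            have hBnorm : stripB_go (pvModeOf false) (l.drop i) = stripB_go .line (l.drop (i + 2)) := by
              rw [pvModeOf_false, hd, pv_go_norm,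
                  if_neg (by rw [hdash]; decide), if_pos ⟨hdash, by rw [hhd]; exact hdash2⟩, htl]
            by_cases hj : PySem.Chars.findFrom l ['\n'] (i : Int) = -1
            · rw [if_pos hj]
              have hno : ¬ ['\n'] <:+: l.drop i :=
                (PySem.Chars.findFrom_natCast_eq_neg_one_iff l ['\n'] i (le_of_lt h)).mp hj
              have hmem : '\n' ∉ l.drop (i + 2) := by
                intro hmem
                exact hno (pv_singleton_infix (by
                  have : l.drop (i + 2) = (l.drop i).drop 2 := by rw [List.drop_drop]
                  rw [this] at hmem
                  exact List.drop_subset _ _ hmem))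
              rw [hBnorm, pv_line_all _ hmem]
              simp
            · rw [if_neg hj]
              obtain ⟨h1, h2, h3⟩ := pvFindSingleton (le_of_lt h) hj
              set jn := (PySem.Chars.findFrom l ['\n'] (i : Int)).toNat with hjn
              have hjlen : jn < l.length := by
                by_contra hc
                rw [List.getElem?_eq_none (by omega)] at h2
                simp at h2
              have hji : i + 2 ≤ jn := by
                by_contra hc
                have hcase : jn = i ∨ jn = i + 1 := by omega
                rcases hcase with hji' | hji'
                · rw [hji', List.getElem?_eq_getElem h] at h2
                  simp at h2
                  rw [h2] at hdash
                  exact absurd hdash (by decide)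
                · rw [hji', hdash2] at h2
                  simp at h2
              rw [ih l jn false out (by omega) (by omega)]
              have hdj : l.drop jn = '\n' :: l.drop (jn + 1) := by
                rw [List.drop_eq_getElem_cons hjlen]
                rw [List.getElem?_eq_getElem hjlen] at h2
                simp at h2
                rw [h2]
              rw [hBnorm, pv_line_skip (jn - (i + 2)) (l.drop (i + 2))
                    (fun k hk => by
                      rw [List.getElem?_drop]
                      exact h3 (i + 2 + k) (by omega) (by omega))
                    (by rw [List.getElem?_drop]
                        have : i + 2 + (jn - (i + 2)) = jn := by omega
                        rw [this]; exact h2)]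
              rw [List.drop_drop]
              have : i + 2 + (jn - (i + 2) + 1) = jn + 1 := by omega
              rw [this, hdj, pvModeOf_false, pv_go_norm]
              simp
          · rw [if_neg hline]
            by_cases hblk : b = false ∧ l[i] = '/' ∧ l[i + 1]? = some '*'
            · rw [if_pos hblk]
              obtain ⟨hb, hsl, hst⟩ := hblk
              subst hb
              have hk : i + 2 ≤ l.length := by
                by_contra hc
                rw [List.getElem?_eq_none (by omega)] at hst
                simp at hst
              have hcast : ((i : Int) + 2) = ((i + 2 : Nat) : Int) := by push_cast; ring
              have hBnorm : stripB_go (pvModeOf false) (l.drop i) = stripB_go .block (l.drop (i + 2)) := by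
                rw [pvModeOf_false, hd, pv_go_norm,
                    if_neg (by rw [hsl]; decide), if_neg (by rw [hsl, hhd, hst]; decide),
                    if_pos ⟨hsl, by rw [hhd]; exact hst⟩, htl]
              by_cases he : PySem.Chars.findFrom l ['*', '/'] ((i : Int) + 2) = -1
              · rw [if_pos he]
                rw [ih l l.length false out (by omega) (by omega)]
                rw [hcast] at he
                have hno : ¬ ['*', '/'] <:+: l.drop (i + 2) :=
                  (PySem.Chars.findFrom_natCast_eq_neg_one_iff l ['*', '/'] (i + 2) hk).mp he
                rw [hBnorm, pv_block_all _ (fun k hp => hno (pv_prefix_drop_infix hp))]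
                simp [List.drop_length, pv_go_nil]
              · rw [if_neg he]
                rw [hcast] at he
                obtain ⟨h1, h2, h3⟩ := PySem.Chars.findFrom_natCast_spec l ['*', '/'] (i + 2) hk he
                set en := (PySem.Chars.findFrom l ['*', '/'] ((i + 2 : Nat) : Int)).toNat with hen
                have hge : i + 2 ≤ en := by omega
                have hlen2 : en + 2 ≤ l.length := by
                  have hl := h2.length_le
                  simp [List.length_drop] at hl
                  omega
                rw [hcast, ih l (en + 2) false out (by omega) (by omega)]
                rw [hBnorm, pv_block_skip (en - (i + 2)) (l.drop (i + 2))
                      (fun k hk' => by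
                        rw [List.drop_drop]
                        exact h3 (i + 2 + k) (by omega) (by omega))
                      (by rw [List.drop_drop]
                          have : i + 2 + (en - (i + 2)) = en := by omega
                          rw [this]; exact h2)]
                rw [List.drop_drop]
                have : i + 2 + (en - (i + 2) + 2) = en + 2 := by omega
                rw [this, pvModeOf_false]
            · rw [if_neg hblk]
              rw [ih l (i + 1) b (out ++ [l[i]]) (by omega) (by omega)]
              cases b with
              | true =>
                  rw [hd, pvModeOf_true, pv_go_instr, if_neg hq]
                  simp
              | false =>
                  have hc1 : ¬ (l[i] = '-' ∧ (l.drop (i + 1)).head? = some '-') := by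
                    rintro ⟨ha, hb'⟩
                    exact hline ⟨rfl, ha, by rw [← hhd]; exact hb'⟩
                  have hc2 : ¬ (l[i] = '/' ∧ (l.drop (i + 1)).head? = some '*') := by
                    rintro ⟨ha, hb'⟩
                    exact hblk ⟨rfl, ha, by rw [← hhd]; exact hb'⟩
                  rw [hd, pvModeOf_false, pv_go_norm,
                      if_neg hq, if_neg hc1, if_neg hc2]
                  simp
      · have hieq : i = l.length := by omega
        rw [stripA_loop]
        simp [hieq, List.drop_length, pv_go_nil]

theorem strip_sql_comments_spec : Claim_equal_strip_sql_comments := by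
  intro sql _
  unfold Spec_strip_sql_comments strip_sql_comments strip_sql_comments_alt
  rw [pv_main (sql.toList.length + 1) sql.toList 0 false [] (by omega) (by omega)]
  rfl
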